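-- pv_equiv track=rewrite | github.com/ChrisBernitsas/15-112-Term-Project-Sudoku | playScreen.py | restrictToHelpfulHint
-- ===== SOURCE A (Python) =====
-- def restrictToHelpfulHint(result, regionWithoutEmptySets):
--     regionWithoutEmtpySetsAndOverlaps=[]
--     for v in regionWithoutEmptySets:
--         regionWithoutEmtpySetsAndOverlaps.append(v)
--     for locationAndCount in result:
--         if locationAndCount in regionWithoutEmtpySetsAndOverlaps:
--             regionWithoutEmtpySetsAndOverlaps.remove(locationAndCount)
--     allLegalsInSets=set()
--     for (eachSet, count) in result:
--         allLegalsInSets=allLegalsInSets.union(eachSet)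
--     for eachLegal in allLegalsInSets:
--         for (eachSet, count) in regionWithoutEmtpySetsAndOverlaps:
--             if eachLegal in eachSet:
--                 return True
--     return False
-- ===== SOURCE B (Python) =====
-- def restrictToHelpfulHint(result, regionWithoutEmptySets):
--     remaining = list(regionWithoutEmptySets)
--     for locationAndCount in result:
--         if locationAndCount in remaining:
--             remaining.remove(locationAndCount)
--     resultLegals = set(x for (s, _) in result for x in s)
--     remainingLegals = set(x for (s, _) in remaining for x in s)
--     return bool(resultLegals & remainingLegals)
-- ===== Notes on version B (the rewrite author's own statement) =====
-- stated objective: simpler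
-- what changed: Replaces A's nested legal-by-set membership scan with two flattened unions (legals of result, legals of the remaining regions) and a single set intersection whose truthiness is the answer.
import Mathlib
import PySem

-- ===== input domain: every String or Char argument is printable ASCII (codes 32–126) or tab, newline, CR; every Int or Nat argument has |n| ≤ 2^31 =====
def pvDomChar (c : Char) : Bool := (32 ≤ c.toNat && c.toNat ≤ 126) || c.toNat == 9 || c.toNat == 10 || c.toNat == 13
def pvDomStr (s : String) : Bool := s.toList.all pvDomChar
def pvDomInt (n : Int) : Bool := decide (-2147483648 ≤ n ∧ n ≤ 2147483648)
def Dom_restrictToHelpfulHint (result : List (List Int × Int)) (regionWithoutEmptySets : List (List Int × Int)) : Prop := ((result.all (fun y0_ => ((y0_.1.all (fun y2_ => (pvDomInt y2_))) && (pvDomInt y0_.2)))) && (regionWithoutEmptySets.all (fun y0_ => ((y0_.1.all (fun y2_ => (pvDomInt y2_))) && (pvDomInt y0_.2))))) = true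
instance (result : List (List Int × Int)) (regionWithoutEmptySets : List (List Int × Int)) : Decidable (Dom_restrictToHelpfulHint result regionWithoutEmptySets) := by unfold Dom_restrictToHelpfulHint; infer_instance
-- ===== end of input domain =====

-- B replaces A's nested legal-by-set membership scan with two flattened unions and one
-- set intersection (objective: simpler); the remaining-list construction is kept.

-- ===== PORT A =====
-- Python tuple equality on (set, count): the sets compare as finite sets.
def pyPairEq (p q : List Int × Int) : Bool :=
  PySem.Set.equal (PySem.Set.ofList p.1) (PySem.Set.ofList q.1) && p.2 == q.2

-- list.remove under the pair equality above (first matching occurrence).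
def removeFirstPair : List (List Int × Int) → (List Int × Int) → List (List Int × Int)
  | [], _ => []
  | x :: xs, v => if pyPairEq x v then xs else x :: removeFirstPair xs v

def restrictToHelpfulHint (result : List (List Int × Int)) (regionWithoutEmptySets : List (List Int × Int)) : Bool :=
  let copy := regionWithoutEmptySets.foldl (fun acc v => acc ++ [v]) []
  let remaining := result.foldl
    (fun acc lc => if acc.any (fun x => pyPairEq x lc) then removeFirstPair acc lc else acc) copy
  let allLegalsInSets := result.foldl (fun s p => PySem.Set.update s p.1) PySem.Set.empty
  -- early-return double loop over the legals set: order-independent, rendered as any/any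
  allLegalsInSets.any (fun eachLegal => remaining.any (fun p => p.1.contains eachLegal))

-- ===== PORT B =====
def remainingRegions (result : List (List Int × Int)) (region : List (List Int × Int)) : List (List Int × Int) :=
  result.foldl
    (fun acc lc => if acc.any (fun x => pyPairEq x lc) then removeFirstPair acc lc else acc) region

def restrictToHelpfulHint_alt (result : List (List Int × Int)) (regionWithoutEmptySets : List (List Int × Int)) : Bool :=
  let resultLegals := PySem.Set.ofList (result.flatMap Prod.fst)
  let remainingLegals := PySem.Set.ofList ((remainingRegions result regionWithoutEmptySets).flatMap Prod.fst)
  !(PySem.Set.inter resultLegals remainingLegals).isEmpty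

-- ===== PRECONDITION & SPEC =====
def Spec_restrictToHelpfulHint (result : List (List Int × Int)) (regionWithoutEmptySets : List (List Int × Int)) (out : Bool) : Prop := out = restrictToHelpfulHint_alt result regionWithoutEmptySets
instance (result : List (List Int × Int)) (regionWithoutEmptySets : List (List Int × Int)) (out : Bool) : Decidable (Spec_restrictToHelpfulHint result regionWithoutEmptySets out) := by unfold Spec_restrictToHelpfulHint; infer_instance

-- ===== CLAIM (what is proved, stated in full; the proofs are below) =====
def Claim_equal_restrictToHelpfulHint : Prop := ∀ (result : List (List Int × Int)) (regionWithoutEmptySets : List (List Int × Int)), Dom_restrictToHelpfulHint result regionWithoutEmptySets → Spec_restrictToHelpfulHint result regionWithoutEmptySets (restrictToHelpfulHint result regionWithoutEmptySets)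

-- ===== LEMMAS AND PROOFS =====

theorem foldl_append_singleton (l acc : List (List Int × Int)) :
    l.foldl (fun a v => a ++ [v]) acc = acc ++ l := by
  induction l generalizing acc with
  | nil => simp
  | cons x xs ih => simp [List.foldl, ih]

theorem mem_foldl_update (result : List (List Int × Int)) (s : PySem.Set Int) (l : Int) :
    l ∈ result.foldl (fun s p => PySem.Set.update s p.1) s ↔ l ∈ s ∨ ∃ p ∈ result, l ∈ p.1 := by
  induction result generalizing s with
  | nil => simp
  | cons x xs ih => simp [List.foldl, ih, PySem.Set.mem_update]; tauto

theorem pv_not_isEmpty_iff (l : List Int) : (!l.isEmpty) = true ↔ ∃ x, x ∈ l := by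
  cases l <;> simp

theorem restrictToHelpfulHint_spec : Claim_equal_restrictToHelpfulHint := by
  intro result region _hDom
  show restrictToHelpfulHint result region = restrictToHelpfulHint_alt result region
  rw [Bool.eq_iff_iff]
  simp only [restrictToHelpfulHint, restrictToHelpfulHint_alt, remainingRegions,
    foldl_append_singleton, List.nil_append, pv_not_isEmpty_iff, List.any_eq_true,
    List.contains_iff_mem, PySem.Set.mem_inter, PySem.Set.mem_ofList, List.mem_flatMap,
    mem_foldl_update]
  constructor
  · rintro ⟨l, hl, p, hp, hlp⟩
    rcases hl with h | ⟨q, hq, hlq⟩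
    · simp [PySem.Set.empty] at h
    · exact ⟨l, ⟨⟨q, hq, hlq⟩, ⟨p, hp, hlp⟩⟩⟩
  · rintro ⟨l, ⟨q, hq, hlq⟩, p, hp, hlp⟩
    exact ⟨l, Or.inr ⟨q, hq, hlq⟩, p, hp, hlp⟩

-- ===== VERDICT (by name: the statement is the Claim_ definition above) =====
-- (verdict theorem proved directly above)
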